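-- pv_equiv track=rewrite | github.com/uberales/aoc2021 | 18/day18.py | get_exploding
-- ===== SOURCE A (Python) =====
-- def get_exploding(number):
--     level = 0
--     for i in range(len(number)):
--         c = number[i]
--         if c == '[':
--             level += 1
--         elif c == ']':
--             level -= 1
--         if level == 5:
--             return i
--     return -1
-- ===== SOURCE B (Python) =====
-- def get_exploding(number):
--     # Positional index lists + two-pointer merge: no running depth accumulator.
--     # Depth can only *reach* 5 at an opening bracket; at the k-th opener (position p)
--     # the depth equals (k + 1) minus the number of closers occurring before p.
--     opens = [i for i, c in enumerate(number) if c == '[']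
--     closes = [i for i, c in enumerate(number) if c == ']']
--     j = 0  # closing brackets located before the current opening bracket
--     for k, p in enumerate(opens):
--         while j < len(closes) and closes[j] < p:
--             j += 1
--         if k + 1 - j == 5:
--             return p
--     return -1
-- ===== Notes on version B (the rewrite author's own statement) =====
-- stated objective: alternative
-- what changed: B keeps no running depth accumulator at all: it builds the index lists of opening- and closing-bracket positions and locates the answer with a two-pointer merge, using the rank arithmetic (k+1) minus the count of closers before p at each opening bracket.
import Mathlib
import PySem

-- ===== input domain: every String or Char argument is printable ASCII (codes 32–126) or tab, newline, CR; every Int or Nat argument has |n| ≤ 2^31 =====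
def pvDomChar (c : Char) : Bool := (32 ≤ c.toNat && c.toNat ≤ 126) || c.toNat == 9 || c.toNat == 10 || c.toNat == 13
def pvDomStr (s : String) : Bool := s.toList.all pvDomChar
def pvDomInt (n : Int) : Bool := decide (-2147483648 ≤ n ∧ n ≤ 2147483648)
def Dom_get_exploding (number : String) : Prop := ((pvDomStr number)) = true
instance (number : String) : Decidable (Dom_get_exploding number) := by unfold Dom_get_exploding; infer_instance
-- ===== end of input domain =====

-- B replaces A's running-depth scan by two bracket-position index lists merged with two pointers (alternative decomposition, same cost).

-- ===== PORT A =====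
-- A: one loop over indices, updating level and returning i as soon as level == 5.
def getExplodingLoopA : List Char → Int → Int → Int
  | [], _, _ => -1
  | c :: rest, i, level =>
    let level' := if c = '[' then level + 1 else if c = ']' then level - 1 else level
    if level' = 5 then i else getExplodingLoopA rest (i + 1) level'

def get_exploding (number : String) : Int :=
  getExplodingLoopA number.toList 0 0

-- ===== PORT B =====
-- B phase 1: the list of positions of a given bracket character (the two comprehensions).
def posOfB (ch : Char) : List Char → Int → List Int
  | [], _ => []
  | c :: rest, i => if c = ch then i :: posOfB ch rest (i + 1) else posOfB ch rest (i + 1)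

-- B's inner while loop: advance past closers located before p, counting them into j.
def dropBeforeB : List Int → Int → Int → List Int × Int
  | [], _, j => ([], j)
  | c :: rest, p, j => if c < p then dropBeforeB rest p (j + 1) else (c :: rest, j)

-- B phase 2: the two-pointer merge over the opening positions.
def mergeLoopB : List Int → List Int → Int → Int → Int
  | [], _, _, _ => -1
  | p :: rest, closes, k, j =>
    let cj := dropBeforeB closes p j
    if k + 1 - cj.2 = 5 then p else mergeLoopB rest cj.1 (k + 1) cj.2

def get_exploding_alt (number : String) : Int :=
  mergeLoopB (posOfB '[' number.toList 0) (posOfB ']' number.toList 0) 0 0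

-- ===== PRECONDITION & SPEC =====
def Spec_get_exploding (number : String) (out : Int) : Prop := out = get_exploding_alt number
instance (number : String) (out : Int) : Decidable (Spec_get_exploding number out) := by unfold Spec_get_exploding; infer_instance

-- ===== CLAIM (what is proved, stated in full; the proofs are below) =====
def Claim_equal_get_exploding : Prop := ∀ (number : String), Dom_get_exploding number → Spec_get_exploding number (get_exploding number)

-- ===== LEMMAS AND PROOFS =====
theorem posOfB_ge (ch : Char) (cs : List Char) : ∀ (i : Int), ∀ x ∈ posOfB ch cs i, i ≤ x := by
  induction cs with
  | nil => intro i x hx; simp [posOfB] at hx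
  | cons c rest ih =>
    intro i x hx
    simp only [posOfB] at hx
    split_ifs at hx with h
    · rcases List.mem_cons.mp hx with rfl | hx
      · exact le_refl x
      · have := ih (i + 1) x hx; omega
    · have := ih (i + 1) x hx; omega

theorem dropBeforeB_append (stale : List Int) (rest : List Int) (p j : Int)
    (h : ∀ x ∈ stale, x < p) :
    dropBeforeB (stale ++ rest) p j = dropBeforeB rest p (j + stale.length) := by
  induction stale generalizing j with
  | nil => simp [dropBeforeB]
  | cons s tl ih =>
    have hs : s < p := h s (by simp)
    simp only [List.cons_append, dropBeforeB, if_pos hs]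
    rw [ih (j + 1) (fun x hx => h x (by simp [hx]))]
    congr 1
    simp [List.length_cons]
    omega

theorem dropBeforeB_ge (rest : List Int) (p j : Int) (h : ∀ x ∈ rest, p ≤ x) :
    dropBeforeB rest p j = (rest, j) := by
  cases rest with
  | nil => rfl
  | cons c tl =>
    have : ¬ c < p := not_lt.mpr (h c (by simp))
    simp [dropBeforeB, this]

theorem loopA_eq_merge (cs : List Char) :
    ∀ (i level k j : Int) (stale : List Int),
      (∀ x ∈ stale, x < i) → level = k - j - stale.length → level ≤ 4 →
      getExplodingLoopA cs i level
        = mergeLoopB (posOfB '[' cs i) (stale ++ posOfB ']' cs i) k j := by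
  induction cs with
  | nil =>
    intro i level k j stale _ _ _
    simp [getExplodingLoopA, posOfB, mergeLoopB]
  | cons c rest ih =>
    intro i level k j stale hstale hinv hle
    by_cases hop : c = '['
    · subst hop
      have hne : ('[' : Char) ≠ ']' := by decide
      simp only [getExplodingLoopA, posOfB, if_pos rfl, if_neg hne, if_true, mergeLoopB]
      have hdrop : dropBeforeB (stale ++ posOfB ']' rest (i + 1)) i j
          = (posOfB ']' rest (i + 1), j + stale.length) := by
        rw [dropBeforeB_append _ _ _ _ hstale]
        exact dropBeforeB_ge _ _ _ (fun x hx => by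
          have := posOfB_ge ']' rest (i + 1) x hx; omega)
      rw [hdrop]
      have hcond : (k + 1 - (j + (stale.length : Int)) = 5) ↔ (level + 1 = 5) := by
        constructor <;> intro h <;> omega
      by_cases h5 : level + 1 = 5
      · rw [if_pos h5, if_pos (hcond.mpr h5)]
      · rw [if_neg h5, if_neg (fun h => h5 (hcond.mp h))]
        have := ih (i + 1) (level + 1) (k + 1) (j + stale.length) []
          (by intro x hx; simp at hx) (by simp; omega) (by omega)
        simpa using this
    · by_cases hcl : c = ']'
      · subst hcl
        have hne : (']' : Char) ≠ '[' := by decide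
        simp only [getExplodingLoopA, posOfB, if_neg hne, if_pos rfl, if_true]
        have h5 : ¬ (level - 1 = 5) := by omega
        rw [if_neg h5]
        have hrec := ih (i + 1) (level - 1) k j (stale ++ [i])
          (by intro x hx; simp at hx; rcases hx with hx | rfl
              · have := hstale x hx; omega
              · omega)
          (by simp [List.length_append]; push_cast; omega) (by omega)
        rw [hrec, List.append_assoc]
        simp
      · simp only [getExplodingLoopA, posOfB, if_neg hop, if_neg hcl]
        have h5 : ¬ (level = 5) := by omega
        rw [if_neg h5]
        exact ih (i + 1) level k j stale
          (fun x hx => by have := hstale x hx; omega) (by omega) (by omega)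

-- ===== VERDICT (by name: the statement is the Claim_ definition above) =====
theorem get_exploding_spec : Claim_equal_get_exploding := by
  intro number _
  show get_exploding number = get_exploding_alt number
  have := loopA_eq_merge number.toList 0 0 0 0 []
    (by intro x hx; simp at hx) (by simp) (by norm_num)
  simpa [get_exploding, get_exploding_alt] using this
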